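-- pv_equiv track=rewrite | github.com/NoelClay/CodingTestKNY | KOSA_CodingTest/week06/연습예제/떡볶이 떡 만들기.py | binary_search_function
-- ===== SOURCE A (Python) =====
-- def binary_search_function(source_list, target_number):
--     s_index = 0
--     s_value = source_list[s_index]
--     e_index = len(source_list)-1
--     e_value = source_list[e_index]
--     while True:
--         m_value = (s_value+e_value) // 2
--         cnt = 0
--         for s in source_list:
--             temp = s-m_value
--             temp = max(temp, 0)
--             cnt = cnt + temp
--
--         if cnt == target_number:
--             return m_value
--         elif cnt > target_number:
--             s_value = m_value+1
--         else:
--             e_value = m_value-1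
--
--         if s_value > e_value:
--             return m_value
-- ===== SOURCE B (Python) =====
-- def binary_search_function(source_list, target_number):
--     # Sort once and build prefix sums, so each cut-height query costs
--     # O(log n) (binary search + prefix-sum lookup) instead of an O(n) scan.
--     srt = sorted(source_list)
--     n = len(srt)
--     pre = [0]
--     acc = 0
--     for x in srt:
--         acc = acc + x
--         pre.append(acc)
--     total = pre[n]
--
--     def count_le(m):
--         # number of elements of srt that are <= m (binary search)
--         lo = 0
--         hi = n
--         while lo < hi:
--             mid = (lo + hi) // 2
--             if srt[mid] <= m:
--                 lo = mid + 1
--             else: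
--                 hi = mid
--         return lo
--
--     s_value = source_list[0]
--     e_value = source_list[n - 1]
--     while True:
--         m_value = (s_value + e_value) // 2
--         k = count_le(m_value)
--         cnt = (total - pre[k]) - (n - k) * m_value
--         if cnt == target_number:
--             return m_value
--         elif cnt > target_number:
--             s_value = m_value + 1
--         else:
--             e_value = m_value - 1
--         if s_value > e_value:
--             return m_value
-- ===== Notes on version B (the rewrite author's own statement) =====
-- stated objective: faster
-- what changed: Instead of rescanning the whole list (sum of max(s-m,0)) at every bisection step, B sorts the list once, builds prefix sums, and answers each leftover-sum query with a binary search plus a prefix-sum lookup.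
-- outside the precondition, e.g. on binary_search_function([], 0): A raises IndexError, B raises IndexError
import Mathlib
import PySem

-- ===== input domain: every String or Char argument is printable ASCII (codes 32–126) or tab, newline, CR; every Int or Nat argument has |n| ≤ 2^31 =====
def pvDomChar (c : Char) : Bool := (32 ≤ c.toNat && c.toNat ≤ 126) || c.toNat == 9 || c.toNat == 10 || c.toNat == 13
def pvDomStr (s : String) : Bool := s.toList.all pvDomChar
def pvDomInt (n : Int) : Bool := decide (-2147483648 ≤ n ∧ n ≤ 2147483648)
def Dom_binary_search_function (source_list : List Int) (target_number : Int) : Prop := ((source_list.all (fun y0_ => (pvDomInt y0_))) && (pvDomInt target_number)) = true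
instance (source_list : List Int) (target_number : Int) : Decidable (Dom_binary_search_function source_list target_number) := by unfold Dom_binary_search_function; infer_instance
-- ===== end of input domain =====

-- B replaces A's rescan of the whole list in every bisection step by a one-time
-- sort + prefix sums, answering each leftover-sum query by binary search (objective: faster).
-- Loops are ported with a structural fuel of (interval length + 1), which is always
-- sufficient: the interval shrinks at every iteration, so the fuel-0 branch is unreachable.

-- ===== PORT A =====
-- A's `while True` loop over (s_value, e_value); the trailing `if s_value > e_value: return m_value`
-- becomes the two inner `if … then m else recurse` branches.
def binary_search_function_loop (xs : List Int) (t : Int) : Int → Int → Nat → Int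
  | _, _, 0 => 0  -- unreachable: the fuel passed below is always sufficient
  | sv, ev, fuel + 1 =>
    let m := PySem.Int.floordiv (sv + ev) 2
    let cnt := xs.foldl (fun c s => c + max (s - m) 0) 0
    if cnt = t then m
    else if cnt > t then
      (if m + 1 > ev then m else binary_search_function_loop xs t (m + 1) ev fuel)
    else
      (if sv > m - 1 then m else binary_search_function_loop xs t sv (m - 1) fuel)

def binary_search_function (source_list : List Int) (target_number : Int) : Int :=
  -- source_list[0] / source_list[len-1]: IndexError on [] — excluded by Pre_; .getD 0 is never used inside Pre_
  let s_value := (PySem.List.pyGet? source_list 0).getD 0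
  let e_value := (PySem.List.pyGet? source_list ((source_list.length : Int) - 1)).getD 0
  binary_search_function_loop source_list target_number s_value e_value ((e_value - s_value).toNat + 1)

-- ===== PORT B =====
-- Source B's hand-written `count_le` binary search (srt[mid] is always in range on the calls made;
-- fuel (hi-lo)+1 is always sufficient: the interval halves every iteration).
def pvCountLeLoop (srt : List Int) (m : Int) : Int → Int → Nat → Int
  | lo, _, 0 => lo  -- unreachable: the fuel passed below is always sufficient
  | lo, hi, fuel + 1 =>
    if lo < hi then
      let mid := PySem.Int.floordiv (lo + hi) 2
      if (PySem.List.pyGet? srt mid).getD 0 ≤ m then pvCountLeLoop srt m (mid + 1) hi fuel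
      else pvCountLeLoop srt m lo mid fuel
    else lo

-- Source B's `for x in srt: acc = acc + x; pre.append(acc)` (the tail of pre after its initial 0)
def pvBuildPre (acc : Int) : List Int → List Int
  | [] => []
  | x :: xs => (acc + x) :: pvBuildPre (acc + x) xs

def binary_search_function_alt_loop (srt pre : List Int) (total n t : Int) : Int → Int → Nat → Int
  | _, _, 0 => 0  -- unreachable: the fuel passed below is always sufficient
  | sv, ev, fuel + 1 =>
    let m := PySem.Int.floordiv (sv + ev) 2
    let k := pvCountLeLoop srt m 0 n (n.toNat + 1)
    let cnt := (total - (PySem.List.pyGet? pre k).getD 0) - (n - k) * m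
    if cnt = t then m
    else if cnt > t then
      (if m + 1 > ev then m else binary_search_function_alt_loop srt pre total n t (m + 1) ev fuel)
    else
      (if sv > m - 1 then m else binary_search_function_alt_loop srt pre total n t sv (m - 1) fuel)

def binary_search_function_alt (source_list : List Int) (target_number : Int) : Int :=
  let srt := PySem.List.sorted source_list (fun x => x) false
  let n := (srt.length : Int)
  let pre := 0 :: pvBuildPre 0 srt
  let total := (PySem.List.pyGet? pre n).getD 0
  -- source_list[0] / source_list[n-1]: IndexError on [] — excluded by Pre_
  let s_value := (PySem.List.pyGet? source_list 0).getD 0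
  let e_value := (PySem.List.pyGet? source_list (n - 1)).getD 0
  binary_search_function_alt_loop srt pre total n target_number s_value e_value ((e_value - s_value).toNat + 1)

-- ===== PRECONDITION & SPEC =====
-- Pre_ excludes only the empty list, on which both Pythons raise IndexError (source_list[0]).
def Pre_binary_search_function (source_list : List Int) (target_number : Int) : Prop := source_list ≠ []
instance (source_list : List Int) (target_number : Int) : Decidable (Pre_binary_search_function source_list target_number) := by unfold Pre_binary_search_function; infer_instance
def pvWitness_binary_search_function : List Int × Int := ([19, 15, 10, 17], 6)

def Spec_binary_search_function (source_list : List Int) (target_number : Int) (out : Int) : Prop := out = binary_search_function_alt source_list target_number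
instance (source_list : List Int) (target_number : Int) (out : Int) : Decidable (Spec_binary_search_function source_list target_number out) := by unfold Spec_binary_search_function; infer_instance

-- ===== CLAIM (what is proved, stated in full; the proofs are below) =====
def Claim_equal_binary_search_function : Prop := ∀ (source_list : List Int) (target_number : Int), Dom_binary_search_function source_list target_number → Pre_binary_search_function source_list target_number → Spec_binary_search_function source_list target_number (binary_search_function source_list target_number)

-- ===== LEMMAS AND PROOFS =====

theorem pvBuildPre_get : ∀ (l : List Int) (a : Int) (k : Nat), k < l.length →
    (pvBuildPre a l)[k]? = some (a + (l.take (k + 1)).sum) := by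
  intro l
  induction l with
  | nil => intro a k h; simp at h
  | cons x xs ih =>
    intro a k h
    cases k with
    | zero => simp [pvBuildPre]
    | succ k =>
      simp only [pvBuildPre, List.getElem?_cons_succ]
      rw [ih (a + x) k (by simpa using h)]
      simp [List.sum_cons]; ring

theorem pvPre_get (l : List Int) (k : Nat) (hk : k ≤ l.length) :
    (0 :: pvBuildPre 0 l)[k]? = some ((l.take k).sum) := by
  cases k with
  | zero => simp
  | succ k =>
    simp only [List.getElem?_cons_succ]
    rw [pvBuildPre_get l 0 k (by omega)]
    simp

theorem pvAllGtExcess (m : Int) : ∀ (l : List Int), (∀ y ∈ l, m < y) →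
    (l.map (fun s => max (s - m) 0)).sum = l.sum - (l.length : Int) * m := by
  intro l
  induction l with
  | nil => simp
  | cons x xs ih =>
    intro h
    have hx : m < x := h x (by simp)
    simp only [List.map_cons, List.sum_cons, List.length_cons]
    rw [ih (fun y hy => h y (by simp [hy]))]
    have : max (x - m) 0 = x - m := by omega
    rw [this]; push_cast; ring

theorem pvSortedExcess (m : Int) : ∀ (l : List Int), List.Pairwise (· ≤ ·) l →
    ((l.map (fun s => max (s - m) 0)).sum
      = (l.drop (l.countP (fun x => decide (x ≤ m)))).sum
        - ((l.length - l.countP (fun x => decide (x ≤ m)) : Nat) : Int) * m) := by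
  intro l
  induction l with
  | nil => simp
  | cons x xs ih =>
    intro hp
    rcases List.pairwise_cons.1 hp with ⟨hx, hxs⟩
    by_cases hxm : x ≤ m
    · have h0 : max (x - m) 0 = 0 := by omega
      simp only [List.map_cons, List.sum_cons, List.countP_cons, hxm, decide_true,
        List.length_cons, h0, zero_add]
      rw [ih hxs]
      simp [List.drop_succ_cons]
    · -- x > m, so every element is > m
      have hall : ∀ y ∈ x :: xs, m < y := by
        intro y hy
        rcases List.mem_cons.1 hy with rfl | hy
        · omega
        · exact lt_of_lt_of_le (by omega) (hx y hy)
      have hc : (x :: xs).countP (fun x => decide (x ≤ m)) = 0 := by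
        rw [List.countP_eq_zero]
        intro y hy
        simpa using not_le.2 (hall y hy)
      rw [hc, pvAllGtExcess m _ hall]
      simp

-- countP of a list that is ≤ m on indices < c and > m on indices ≥ c
theorem pvCountP_of_split (srt : List Int) (m : Int) (c : Nat) (hc : c ≤ srt.length)
    (hlow : ∀ i : Nat, i < c → ∀ h : i < srt.length, srt[i] ≤ m)
    (hhigh : ∀ i : Nat, c ≤ i → ∀ h : i < srt.length, m < srt[i]) :
    srt.countP (fun x => decide (x ≤ m)) = c := by
  have hsplit : srt = srt.take c ++ srt.drop c := (List.take_append_drop c srt).symm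
  rw [hsplit, List.countP_append]
  have h1 : (srt.take c).countP (fun x => decide (x ≤ m)) = c := by
    rw [List.countP_eq_length.2, List.length_take_of_le hc]
    intro a ha
    rcases List.mem_iff_getElem.1 ha with ⟨i, hi, rfl⟩
    have hi' : i < c := by simp [List.length_take] at hi; omega
    rw [List.getElem_take]
    simpa using hlow i hi' (by omega)
  have h2 : (srt.drop c).countP (fun x => decide (x ≤ m)) = 0 := by
    rw [List.countP_eq_zero]
    intro a ha
    rcases List.mem_iff_getElem.1 ha with ⟨i, hi, rfl⟩
    rw [List.getElem_drop]
    simpa using not_le.2 (hhigh (c + i) (by omega) (by simp at hi; omega))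
  omega

-- the binary search returns the number of elements ≤ m, given the interval invariants
theorem pvCountLeLoop_correct (srt : List Int) (m : Int)
    (hsort : List.Pairwise (· ≤ ·) srt) :
    ∀ fuel : Nat, ∀ lo hi : Int, (hi - lo).toNat < fuel → 0 ≤ lo → lo ≤ hi → hi ≤ (srt.length : Int) →
    (∀ i : Nat, (i : Int) < lo → ∀ h : i < srt.length, srt[i] ≤ m) →
    (∀ i : Nat, hi ≤ (i : Int) → ∀ h : i < srt.length, m < srt[i]) →
    pvCountLeLoop srt m lo hi fuel = (srt.countP (fun x => decide (x ≤ m)) : Int) := by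
  have hmono : ∀ (i j : Nat), ∀ _hij : i ≤ j, ∀ h : j < srt.length, srt[i]'(by omega) ≤ srt[j] := by
    intro i j hij h
    rcases Nat.eq_or_lt_of_le hij with rfl | hlt
    · exact le_refl _
    · exact List.pairwise_iff_getElem.1 hsort i j (by omega) h hlt
  intro fuel
  induction fuel with
  | zero => intro lo hi h; omega
  | succ N ih =>
    intro lo hi hN h0 hlh hhn hlow hhigh
    rw [pvCountLeLoop]
    by_cases hcmp : lo < hi
    · simp only [hcmp, if_true]
      have h1 := PySem.Int.floordiv_mul_add_mod (lo + hi) 2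
      have h2 := PySem.Int.mod_nonneg (lo + hi) (by norm_num : (0:Int) < 2)
      have h3 := PySem.Int.mod_lt (lo + hi) (by norm_num : (0:Int) < 2)
      set mid := PySem.Int.floordiv (lo + hi) 2 with hmid
      have hb : lo ≤ mid ∧ mid < hi := by omega
      have hmr : mid < (srt.length : Int) := by omega
      rw [PySem.List.pyGet?_eq_some_getElem srt (by omega) hmr]
      simp only [Option.getD_some]
      by_cases hle : srt[mid.toNat]'(by omega) ≤ m
      · simp only [hle, if_true]
        apply ih (mid + 1) hi (by omega) (by omega) (by omega) hhn
        · intro i hi' h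
          have : i ≤ mid.toNat := by omega
          exact le_trans (hmono i mid.toNat this (by omega)) hle
        · exact hhigh
      · simp only [hle, if_false]
        apply ih lo mid (by omega) h0 (by omega) (by omega) hlow
        · intro i hi' h
          have : mid.toNat ≤ i := by omega
          exact lt_of_lt_of_le (by omega) (hmono mid.toNat i this h)
    · simp only [hcmp, if_false]
      have : lo = hi := by omega
      subst this
      rw [pvCountP_of_split srt m lo.toNat (by omega)
        (fun i hi h => hlow i (by omega) h)
        (fun i hi h => hhigh i (by omega) h)]
      omega

-- B's query formula equals A's fold, for every threshold m
theorem pvCnt_eq (xs : List Int) (m : Int) :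
    ((PySem.List.pyGet? (0 :: pvBuildPre 0 (PySem.List.sorted xs (fun x => x) false)) (xs.length : Int)).getD 0
      - (PySem.List.pyGet? (0 :: pvBuildPre 0 (PySem.List.sorted xs (fun x => x) false))
          (pvCountLeLoop (PySem.List.sorted xs (fun x => x) false) m 0 (xs.length : Int) ((xs.length : Int).toNat + 1))).getD 0)
      - ((xs.length : Int) - pvCountLeLoop (PySem.List.sorted xs (fun x => x) false) m 0 (xs.length : Int) ((xs.length : Int).toNat + 1)) * m
    = xs.foldl (fun c s => c + max (s - m) 0) 0 := by
  set srt := PySem.List.sorted xs (fun x => x) false with hsrt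
  have hlen : srt.length = xs.length := PySem.List.length_sorted xs _ false
  have hsort : List.Pairwise (· ≤ ·) srt := by
    simpa using PySem.List.sorted_pairwise xs (fun x => x)
  have hk : pvCountLeLoop srt m 0 (xs.length : Int) ((xs.length : Int).toNat + 1)
      = (srt.countP (fun x => decide (x ≤ m)) : Int) := by
    apply pvCountLeLoop_correct srt m hsort ((xs.length : Int).toNat + 1) 0 (xs.length : Int)
    · omega
    · omega
    · omega
    · omega
    · intro i hi h; omega
    · intro i hi h; omega
  set c := srt.countP (fun x => decide (x ≤ m)) with hc
  have hcle : c ≤ srt.length := List.countP_le_length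
  have htotal : (PySem.List.pyGet? (0 :: pvBuildPre 0 srt) (xs.length : Int)).getD 0 = srt.sum := by
    rw [← hlen, PySem.List.pyGet?_natCast, pvPre_get srt srt.length le_rfl]
    simp
  have hprek : (PySem.List.pyGet? (0 :: pvBuildPre 0 srt) ((c : Nat) : Int)).getD 0 = (srt.take c).sum := by
    rw [PySem.List.pyGet?_natCast, pvPre_get srt c hcle]
    simp
  rw [hk, htotal, hprek, PySem.List.foldl_add]
  have hperm : ((srt.map (fun s => max (s - m) 0)).sum = (xs.map (fun s => max (s - m) 0)).sum) :=
    ((PySem.List.sorted_perm xs (fun x => x) false).map _).sum_eq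
  rw [zero_add, ← hperm, pvSortedExcess m srt hsort, ← hc]
  have hcast : ((xs.length : Int) - (c : Int)) = ((srt.length - c : Nat) : Int) := by omega
  rw [hcast]
  have hsum : (srt.take c).sum + (srt.drop c).sum = srt.sum := by
    rw [← List.sum_append, List.take_append_drop]
  linarith [hsum]

-- the two loops agree pointwise (same fuel, same state trajectory)
theorem pvLoops_eq (xs : List Int) (t : Int) :
    ∀ fuel : Nat, ∀ sv ev : Int,
    binary_search_function_alt_loop (PySem.List.sorted xs (fun x => x) false)
      (0 :: pvBuildPre 0 (PySem.List.sorted xs (fun x => x) false))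
      ((PySem.List.pyGet? (0 :: pvBuildPre 0 (PySem.List.sorted xs (fun x => x) false))
        (xs.length : Int)).getD 0)
      (xs.length : Int) t sv ev fuel
    = binary_search_function_loop xs t sv ev fuel := by
  intro fuel
  induction fuel with
  | zero => intro sv ev; rfl
  | succ N ih =>
    intro sv ev
    rw [binary_search_function_alt_loop, binary_search_function_loop]
    simp only [pvCnt_eq]
    split_ifs
    · rfl
    · rfl
    · exact ih (PySem.Int.floordiv (sv + ev) 2 + 1) ev
    · rfl
    · exact ih sv (PySem.Int.floordiv (sv + ev) 2 - 1)

-- ===== VERDICT (by name: the statement is the Claim_ definition above) =====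
theorem binary_search_function_spec : Claim_equal_binary_search_function := by
  intro xs t _hdom _hpre
  unfold Spec_binary_search_function binary_search_function binary_search_function_alt
  simp only [PySem.List.length_sorted]
  exact (pvLoops_eq xs t _ _ _).symm
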